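-- pv_equiv track=rewrite | github.com/dkawa2523/cantera_network | src/rxn_platform/tasks/graphs.py | _formula_element_order
-- ===== SOURCE A (Python) =====
-- from collections.abc import Mapping, Sequence
--
-- def _formula_element_order(elements: Mapping[str, float]) -> list[str]:
--     names = sorted(elements.keys())
--     if "C" in elements:
--         order = ["C"]
--         if "H" in elements:
--             order.append("H")
--         for name in names:
--             if name not in ("C", "H"):
--                 order.append(name)
--         return order
--     return names
-- ===== SOURCE B (Python) =====
-- def _merge(a, b):
--     out = []
--     i = j = 0
--     while i < len(a) and j < len(b):
--         if b[j] < a[i]: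
--             out.append(b[j])
--             j += 1
--         else:
--             out.append(a[i])
--             i += 1
--     out.extend(a[i:])
--     out.extend(b[j:])
--     return out
--
--
-- def _msort(xs):
--     if len(xs) <= 1:
--         return list(xs)
--     mid = len(xs) // 2
--     return _merge(_msort(xs[:mid]), _msort(xs[mid:]))
--
--
-- def _formula_element_order(elements):
--     if "C" not in elements:
--         return _msort(list(elements))
--     prefix = ["C"] + (["H"] if "H" in elements else [])
--     return prefix + _msort([k for k in elements if k not in ("C", "H")])
-- ===== Notes on version B (the rewrite author's own statement) =====
-- stated objective: alternative
-- what changed: B partitions the special keys C/H away first (prefix built directly from membership) and sorts only the remaining names with a hand-written divide-and-conquer merge sort, instead of A's library sort of all keys followed by a rebuild loop that skips C and H.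
import Mathlib
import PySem

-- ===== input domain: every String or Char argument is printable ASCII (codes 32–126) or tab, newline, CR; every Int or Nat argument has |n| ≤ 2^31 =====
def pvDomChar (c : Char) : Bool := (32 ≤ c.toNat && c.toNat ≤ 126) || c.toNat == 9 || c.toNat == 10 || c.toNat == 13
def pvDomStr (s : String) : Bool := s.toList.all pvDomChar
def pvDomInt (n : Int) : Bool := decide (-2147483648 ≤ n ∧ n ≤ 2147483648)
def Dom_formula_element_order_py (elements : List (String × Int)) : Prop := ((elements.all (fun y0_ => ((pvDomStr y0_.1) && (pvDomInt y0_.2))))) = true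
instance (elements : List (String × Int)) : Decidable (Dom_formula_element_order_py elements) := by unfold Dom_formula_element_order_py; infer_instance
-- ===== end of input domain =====

-- B partitions the C/H prefix away by membership and sorts only the remaining names with a
-- hand-written merge sort, instead of A's library sort of all keys plus a rebuild loop (alternative, same cost).


-- ===== PORT A =====
def formula_element_order_py (elements : List (String × Int)) : List String :=
  let d := PySem.Dict.ofList elements
  let names := PySem.List.sorted d.keys (fun x => x)
  if d.contains "C" then
    let order : List String := ["C"]
    let order := if d.contains "H" then order ++ ["H"] else order
    names.foldl (fun order name =>
      if !(name == "C" || name == "H") then order ++ [name] else order) order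
  else names

-- ===== PORT B =====
-- B's _merge: two-finger merge of two lists (index loop rendered as structural recursion)
def pvMerge : List String → List String → List String
  | [], b => b
  | x :: xs, [] => x :: xs
  | x :: xs, y :: ys =>
    if y < x then y :: pvMerge (x :: xs) ys else x :: pvMerge xs (y :: ys)
termination_by a b => a.length + b.length
decreasing_by all_goals (simp only [List.length_cons]; omega)

-- B's _msort: split at len//2, recurse, merge
def pvMsort (xs : List String) : List String :=
  if xs.length ≤ 1 then xs
  else pvMerge (pvMsort (xs.take (xs.length / 2))) (pvMsort (xs.drop (xs.length / 2)))
termination_by xs.length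
decreasing_by all_goals (simp only [List.length_take, List.length_drop]; omega)

def formula_element_order_py_alt (elements : List (String × Int)) : List String :=
  let d := PySem.Dict.ofList elements
  if !(d.contains "C") then pvMsort d.keys
  else
    let pfx : List String := ["C"] ++ (if d.contains "H" then ["H"] else [])
    pfx ++ pvMsort (d.keys.filter (fun k => !(k == "C" || k == "H")))

-- ===== PRECONDITION & SPEC =====
def Spec_formula_element_order_py (elements : List (String × Int)) (out : List String) : Prop := out = formula_element_order_py_alt elements
instance (elements : List (String × Int)) (out : List String) : Decidable (Spec_formula_element_order_py elements out) := by unfold Spec_formula_element_order_py; infer_instance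

-- ===== CLAIM (what is proved, stated in full; the proofs are below) =====
def Claim_equal_formula_element_order_py : Prop := ∀ (elements : List (String × Int)), Dom_formula_element_order_py elements → Spec_formula_element_order_py elements (formula_element_order_py elements)

-- ===== LEMMAS AND PROOFS =====

theorem pvMerge_perm : ∀ (a b : List String), (pvMerge a b).Perm (a ++ b) := by
  intro a b
  induction a, b using pvMerge.induct with
  | case1 b => simp [pvMerge]
  | case2 x xs => simp [pvMerge]
  | case3 x xs y ys h ih =>
    rw [pvMerge, if_pos h]
    exact (ih.cons y).trans List.perm_middle.symm
  | case4 x xs y ys h ih =>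
    rw [pvMerge, if_neg h]
    exact ih.cons x

theorem pvMerge_pairwise : ∀ (a b : List String), a.Pairwise (· ≤ ·) → b.Pairwise (· ≤ ·) →
    (pvMerge a b).Pairwise (· ≤ ·) := by
  intro a b
  induction a, b using pvMerge.induct with
  | case1 b => intro _ hb; simpa [pvMerge] using hb
  | case2 x xs => intro ha _; simpa [pvMerge] using ha
  | case3 x xs y ys h ih =>
    intro ha hb
    rw [pvMerge, if_pos h]
    rw [List.pairwise_cons] at hb
    refine List.pairwise_cons.mpr ⟨?_, ih ha hb.2⟩
    intro z hz
    have hz' : z ∈ (x :: xs) ++ ys := (pvMerge_perm (x :: xs) ys).mem_iff.mp hz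
    rcases List.mem_append.mp hz' with hz' | hz'
    · rcases List.mem_cons.mp hz' with rfl | hz'
      · exact le_of_lt h
      · exact (le_of_lt h).trans ((List.pairwise_cons.mp ha).1 z hz')
    · exact hb.1 z hz'
  | case4 x xs y ys h ih =>
    intro ha hb
    rw [pvMerge, if_neg h]
    rw [List.pairwise_cons] at ha
    refine List.pairwise_cons.mpr ⟨?_, ih ha.2 hb⟩
    intro z hz
    have hxy : x ≤ y := not_lt.mp h
    have hz' : z ∈ xs ++ (y :: ys) := (pvMerge_perm xs (y :: ys)).mem_iff.mp hz
    rcases List.mem_append.mp hz' with hz' | hz'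
    · exact ha.1 z hz'
    · rcases List.mem_cons.mp hz' with rfl | hz'
      · exact hxy
      · exact hxy.trans ((List.pairwise_cons.mp hb).1 z hz')

theorem pvMsort_perm : ∀ (xs : List String), (pvMsort xs).Perm xs := by
  intro xs
  induction xs using pvMsort.induct with
  | case1 xs h => rw [pvMsort.eq_def, if_pos h]
  | case2 xs h ih1 ih2 =>
    rw [pvMsort.eq_def, if_neg h]
    exact (pvMerge_perm _ _).trans ((ih1.append ih2).trans (by rw [List.take_append_drop]))

theorem pvMsort_pairwise : ∀ (xs : List String), (pvMsort xs).Pairwise (· ≤ ·) := by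
  intro xs
  induction xs using pvMsort.induct with
  | case1 xs h =>
    rw [pvMsort.eq_def, if_pos h]
    match xs, h with
    | [], _ => exact List.Pairwise.nil
    | [a], _ => simp
  | case2 xs h ih1 ih2 =>
    rw [pvMsort.eq_def, if_neg h]
    exact pvMerge_pairwise _ _ ih1 ih2

-- pvMsort computes exactly Python's sorted() on strings
theorem pvMsort_eq_sorted (xs : List String) :
    PySem.List.sorted xs (fun x => x) = pvMsort xs :=
  PySem.List.sorted_id_eq_of_perm_of_pairwise xs (pvMsort xs) (pvMsort_perm xs) (pvMsort_pairwise xs)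

theorem formula_element_order_py_spec : Claim_equal_formula_element_order_py := by
  intro elements _
  show formula_element_order_py elements = formula_element_order_py_alt elements
  set d := PySem.Dict.ofList elements with hd
  by_cases hC : d.contains "C" = true
  · -- carbon present: A rebuilds from the full sorted list; B merges only the rest
    have hfilter : (PySem.List.sorted d.keys (fun x => x)).filter
          (fun k => !(k == "C" || k == "H")) =
        pvMsort (d.keys.filter (fun k => !(k == "C" || k == "H"))) := by
      have hperm : ((PySem.List.sorted d.keys (fun x => x)).filter
            (fun k => !(k == "C" || k == "H"))).Perm
          (d.keys.filter (fun k => !(k == "C" || k == "H"))) :=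
        (PySem.List.sorted_perm d.keys (fun x => x) false).filter _
      have hpw : ((PySem.List.sorted d.keys (fun x => x)).filter
            (fun k => !(k == "C" || k == "H"))).Pairwise (· ≤ ·) :=
        (PySem.List.sorted_pairwise d.keys (fun x => x)).filter _
      calc (PySem.List.sorted d.keys (fun x => x)).filter (fun k => !(k == "C" || k == "H"))
          = PySem.List.sorted (d.keys.filter (fun k => !(k == "C" || k == "H"))) (fun x => x) :=
            (PySem.List.sorted_id_eq_of_perm_of_pairwise _ _ hperm hpw).symm
        _ = pvMsort (d.keys.filter (fun k => !(k == "C" || k == "H"))) := pvMsort_eq_sorted _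
    by_cases hH : d.contains "H" = true
    · simp only [formula_element_order_py, formula_element_order_py_alt, ← hd, hC, hH,
        if_true, Bool.not_true, Bool.false_eq_true, if_false]
      rw [PySem.List.foldl_append_if (fun k => !(k == "C" || k == "H")) (fun name => name) _
        (["C"] ++ ["H"])]
      simp only [List.map_id_fun', id, hfilter, List.cons_append, List.nil_append]
    · simp only [formula_element_order_py, formula_element_order_py_alt, ← hd, hC, hH,
        if_true, Bool.not_true, Bool.false_eq_true, if_false]
      rw [PySem.List.foldl_append_if (fun k => !(k == "C" || k == "H")) (fun name => name) _
        ["C"]]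
      simp only [List.map_id_fun', id, hfilter, List.cons_append, List.nil_append,
        List.append_nil]
  · -- no carbon: A's sorted names equal B's merge sort of all keys
    simp only [formula_element_order_py, formula_element_order_py_alt, ← hd, hC,
      Bool.false_eq_true, if_false, Bool.not_false, if_true]
    exact pvMsort_eq_sorted d.keys
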